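-- pv_equiv track=rewrite | github.com/reynave/belfoods.com | .tmp_translate_cms_content.py | find_statement_end
-- ===== SOURCE A (Python) =====
-- def find_statement_end(src: str, start_idx: int):
--     i = start_idx
--     n = len(src)
--     in_str = False
--     while i < n:
--         ch = src[i]
--         if in_str:
--             if ch == "'":
--                 if i + 1 < n and src[i + 1] == "'":
--                     i += 2
--                     continue
--                 in_str = False
--             i += 1
--             continue
--         if ch == "'":
--             in_str = True
--             i += 1
--             continue
--         if ch == ';':
--             return i
--         i += 1
--     return -1
-- ===== SOURCE B (Python) =====
-- def find_statement_end(src: str, start_idx: int):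
--     # Different algorithm: split the text on single quotes. Chunks alternate
--     # code / string-literal body; a '' escape simply yields an empty code chunk,
--     # which cannot contain ';'. Search ';' only in the code chunks and map the
--     # chunk-relative hit back to an absolute index.
--     chunks = src[start_idx:].split("'")
--     pos = start_idx
--     while chunks:
--         code = chunks.pop(0)
--         j = code.find(';')
--         if j != -1:
--             return pos + j
--         if not chunks:
--             return -1
--         lit = chunks.pop(0)
--         pos += len(code) + 1 + len(lit) + 1
--     return -1
-- ===== Notes on version B (the rewrite author's own statement) =====
-- stated objective: faster
-- what changed: Replaces A's character-by-character scan with an in_str state machine by a split-based algorithm: split the text on single quotes, so chunks alternate code/string-literal (a '' escape yields an empty code chunk that cannot hold ';'), and search ';' only in the code chunks, mapping the hit back to an absolute index.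
-- outside the precondition, e.g. on find_statement_end(';a', -1): A returns 0, B returns -1; on find_statement_end('', -1): A raises IndexError, B returns -1
import Mathlib
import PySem

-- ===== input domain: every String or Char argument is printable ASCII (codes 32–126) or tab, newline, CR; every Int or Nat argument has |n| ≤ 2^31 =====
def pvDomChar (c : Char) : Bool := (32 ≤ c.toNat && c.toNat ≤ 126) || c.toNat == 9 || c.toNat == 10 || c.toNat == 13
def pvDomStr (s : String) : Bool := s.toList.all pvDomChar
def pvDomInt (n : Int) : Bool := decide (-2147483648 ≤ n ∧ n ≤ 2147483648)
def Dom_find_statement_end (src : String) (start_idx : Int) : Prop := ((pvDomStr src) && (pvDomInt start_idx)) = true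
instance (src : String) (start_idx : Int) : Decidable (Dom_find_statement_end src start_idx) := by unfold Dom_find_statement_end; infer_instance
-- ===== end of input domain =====

-- B replaces A's character-by-character in_str state machine by a split-based algorithm
-- (split on single quotes, search ';' only in the alternating code chunks); the timing
-- run measured B faster by a constant factor.

-- ===== PORT A =====
-- A's single while-loop with the in_str flag; src[i] is Python indexing, always in
-- range under Pre_, so the getD default is never the value used.
def pvLoopA (s : List Char) (n i : Int) (instr : Bool) : Int :=
  if h : i < n then
    let ch := (PySem.List.pyGet? s i).getD ' '
    if instr then
      if ch = '\'' then
        if i + 1 < n ∧ (PySem.List.pyGet? s (i + 1)).getD ' ' = '\'' then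
          pvLoopA s n (i + 2) instr
        else
          pvLoopA s n (i + 1) false
      else
        pvLoopA s n (i + 1) instr
    else if ch = '\'' then
      pvLoopA s n (i + 1) true
    else if ch = ';' then
      i
    else
      pvLoopA s n (i + 1) instr
  else -1
  termination_by (n - i).toNat
  decreasing_by all_goals omega

def find_statement_end (src : String) (start_idx : Int) : Int :=
  pvLoopA src.toList (src.toList.length : Int) start_idx false

-- ===== PORT B =====
-- Source B's while-loop over the chunk list: pop a code chunk, look for ';' in it,
-- otherwise pop (and skip) the following literal chunk and advance pos.
def pvPairs (chunks : List (List Char)) (pos : Int) : Int :=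
  match chunks with
  | [] => -1
  | code :: rest =>
    let j := PySem.Chars.find code [';']
    if j ≠ -1 then pos + j
    else
      match rest with
      | [] => -1
      | lit :: rest2 => pvPairs rest2 (pos + code.length + 1 + lit.length + 1)

def find_statement_end_alt (src : String) (start_idx : Int) : Int :=
  pvPairs (PySem.Chars.splitOn (PySem.List.slice src.toList (some start_idx) none) ['\'']) start_idx

-- ===== PRECONDITION & SPEC =====
-- Pre_ excludes negative start_idx: below -len(src) A raises IndexError, and on
-- [-len(src), 0) both readings of a negative start are defensible (A's negative-index
-- wraparound scans the tail and then rescans from position 0, B reads it as a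
-- position from the end and scans the tail only), so no caller could rely on either.
def Pre_find_statement_end (src : String) (start_idx : Int) : Prop := 0 ≤ start_idx
instance (src : String) (start_idx : Int) : Decidable (Pre_find_statement_end src start_idx) := by
  unfold Pre_find_statement_end; infer_instance

def pvWitness_find_statement_end : String × Int := ("a = 'x;''y'; b", 0)

def Spec_find_statement_end (src : String) (start_idx : Int) (out : Int) : Prop := out = find_statement_end_alt src start_idx
instance (src : String) (start_idx : Int) (out : Int) : Decidable (Spec_find_statement_end src start_idx out) := by unfold Spec_find_statement_end; infer_instance

-- ===== CLAIM (what is proved, stated in full; the proofs are below) =====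
def Claim_equal_find_statement_end : Prop := ∀ (src : String) (start_idx : Int), Dom_find_statement_end src start_idx → Pre_find_statement_end src start_idx → Spec_find_statement_end src start_idx (find_statement_end src start_idx)

-- ===== LEMMAS AND PROOFS =====

-- Reference version of split-on-quote, structural in the list.
def pvSplit (l : List Char) : List (List Char) :=
  match l with
  | [] => [[]]
  | c :: cs =>
    if c = '\'' then [] :: pvSplit cs
    else
      match pvSplit cs with
      | r :: rs => (c :: r) :: rs
      | [] => [[c]]

theorem pvSplit_ne_nil (l : List Char) : pvSplit l ≠ [] := by
  match l with
  | [] => simp [pvSplit]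
  | c :: cs =>
    simp only [pvSplit]
    split_ifs
    · simp
    · cases h : pvSplit cs <;> simp

-- PySem's splitOn on a single-quote separator computes pvSplit.
theorem splitOn_go_quote (fuel : Nat) :
    ∀ (l cur : List Char) (acc : List (List Char)), l.length ≤ fuel →
      PySem.Chars.splitOn.go ['\''] fuel l cur acc =
        acc.reverse ++ (pvSplit l).modifyHead (cur.reverse ++ ·) := by
  induction fuel with
  | zero =>
    intro l cur acc hl
    have : l = [] := List.eq_nil_of_length_eq_zero (by omega)
    subst this
    simp [PySem.Chars.splitOn.go, pvSplit]
  | succ fuel IH =>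
    intro l cur acc hl
    match l with
    | [] => simp [PySem.Chars.splitOn.go, pvSplit]
    | c :: cs =>
      simp only [PySem.Chars.splitOn.go]
      by_cases hc : c = '\''
      · subst hc
        have hpre : (['\''] : List Char).isPrefixOf ('\'' :: cs) = true := by simp
        rw [if_pos hpre]
        rw [show List.drop (['\''] : List Char).length ('\'' :: cs) = cs from rfl]
        rw [IH cs [] _ (by simpa using Nat.le_of_succ_le_succ hl)]
        simp only [pvSplit]
        cases pvSplit cs <;> simp
      · have hpre : (['\''] : List Char).isPrefixOf (c :: cs) = false := by
          simp [List.isPrefixOf]; intro h; exact absurd h.symm hc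
        rw [if_neg (by simp [hpre])]
        rw [IH cs (c :: cur) acc (by simpa using Nat.le_of_succ_le_succ hl)]
        simp only [pvSplit, if_neg hc]
        cases h : pvSplit cs with
        | nil => exact absurd h (pvSplit_ne_nil cs)
        | cons r rs => simp

theorem splitOn_quote (l : List Char) : PySem.Chars.splitOn l ['\''] = pvSplit l := by
  show PySem.Chars.splitOn.go ['\''] (l.length + 1) l [] [] = pvSplit l
  rw [splitOn_go_quote (l.length + 1) l [] [] (by omega)]
  cases h : pvSplit l <;> simp

-- Chars.find with a single-character needle, cons characterisation.
theorem find_semi_cons (c : Char) (cs : List Char) :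
    PySem.Chars.find (c :: cs) [';'] =
      if c = ';' then 0
      else if PySem.Chars.find cs [';'] = -1 then -1
      else PySem.Chars.find cs [';'] + 1 := by
  by_cases hc : c = ';'
  · subst hc
    have hinf : ([';'] : List Char) <:+: (';' :: cs) := ⟨[], cs, by simp⟩
    have h0 : 0 ≤ PySem.Chars.find (';' :: cs) [';'] :=
      (PySem.Chars.find_nonneg_iff _ _).mpr hinf
    obtain ⟨hp, hmin⟩ := PySem.Chars.find_spec h0
    have hz : ¬ 0 < (PySem.Chars.find (';' :: cs) [';']).toNat :=
      fun hpos => hmin 0 hpos (by simp)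
    show PySem.Chars.find (';' :: cs) [';'] = 0
    omega
  · by_cases hg : PySem.Chars.find cs [';'] = -1
    · have hninf : ¬ ([';'] : List Char) <:+: cs := (PySem.Chars.find_eq_neg_one_iff _ _).mp hg
      have : ¬ ([';'] : List Char) <:+: (c :: cs) := by
        intro h
        rcases (List.infix_cons_iff).mp h with h1 | h2
        · rcases h1 with ⟨t, ht⟩
          simp at ht
          exact hc ht.1.symm
        · exact hninf h2
      rw [(PySem.Chars.find_eq_neg_one_iff _ _).mpr this]
      simp [hc, hg]
    · have hg0 : 0 ≤ PySem.Chars.find cs [';'] := by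
        have := PySem.Chars.neg_one_le_find cs [';']
        omega
      obtain ⟨hp, hmin⟩ := PySem.Chars.find_spec hg0
      set g : Nat := (PySem.Chars.find cs [';']).toNat with hgdef
      -- the needle occurs in c :: cs at g+1 and nowhere before
      have hinf : ([';'] : List Char) <:+: (c :: cs) := by
        have : ([';'] : List Char) <:+: cs :=
          hp.isInfix.trans (List.drop_suffix g cs).isInfix
        exact this.trans (List.suffix_cons c cs).isInfix
      have h0 : 0 ≤ PySem.Chars.find (c :: cs) [';'] :=
        (PySem.Chars.find_nonneg_iff _ _).mpr hinf
      obtain ⟨hp', hmin'⟩ := PySem.Chars.find_spec h0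
      set f : Nat := (PySem.Chars.find (c :: cs) [';']).toNat with hfdef
      have hup : f ≤ g + 1 := by
        by_contra hlt
        exact (hmin' (g + 1) (by omega)) (by simpa using hp)
      have hlo : g + 1 ≤ f := by
        by_contra hlt
        rcases Nat.eq_zero_or_pos f with hf0 | hfpos
        · rw [hf0] at hp'
          simp at hp'
          exact hc hp'.symm
        · obtain ⟨j, hj⟩ : ∃ j, f = j + 1 := ⟨f - 1, by omega⟩
          rw [hj] at hp'
          exact hmin j (by omega) (by simpa using hp')
      have : f = g + 1 := by omega
      simp only [if_neg hc, if_neg hg]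
      omega

-- pvPairs resumed inside a string literal: skip the first chunk (the rest of the
-- literal) and its closing quote.
def pvSkip (chunks : List (List Char)) (pos : Int) : Int :=
  match chunks with
  | [] => -1
  | lit :: rest => if rest = [] then -1 else pvPairs rest (pos + lit.length + 1)

theorem pvPairs_nil_head (cs : List (List Char)) (pos : Int) :
    pvPairs ([] :: cs) pos = pvSkip cs (pos + 1) := by
  have hfind : PySem.Chars.find [] [';'] = -1 := by decide
  cases cs with
  | nil => simp [pvPairs, pvSkip, hfind]
  | cons lit rest =>
    cases rest with
    | nil => simp [pvPairs, pvSkip, hfind]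
    | cons r rs =>
      simp only [pvPairs, pvSkip, hfind]
      norm_num
      simp

theorem pvSkip_esc (ms : List (List Char)) (pos : Int) :
    pvSkip ([] :: [] :: ms) pos = pvSkip ms (pos + 2) := by
  have hfind : PySem.Chars.find [] [';'] = -1 := by decide
  cases ms with
  | nil => simp [pvSkip, pvPairs, hfind]
  | cons t ts =>
    cases ts with
    | nil => simp [pvSkip, pvPairs, hfind]
    | cons u us =>
      simp only [pvSkip, pvPairs, hfind]
      norm_num
      have h1 : pos + 1 + 1 + (t.length:Int) + 1 = pos + 2 + ↑t.length + 1 := by ring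
      simp [h1]

-- Main loop correspondence: A's flagged scan from position i equals pvPairs/pvSkip
-- on the quote-split of the remaining suffix.
theorem pvLoop_split (s : List Char) :
    ∀ (k : Nat) (i : Int), 0 ≤ i → s.length - i.toNat ≤ k →
      pvLoopA s (s.length : Int) i false = pvPairs (pvSplit (s.drop i.toNat)) i ∧
      pvLoopA s (s.length : Int) i true = pvSkip (pvSplit (s.drop i.toNat)) i := by
  intro k
  induction k with
  | zero =>
    intro i h0 hk
    have hn : ¬ i < (s.length : Int) := by omega
    have hd : s.drop i.toNat = [] := List.drop_of_length_le (by omega)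
    rw [hd]
    have hfind : PySem.Chars.find [] [';'] = -1 := by decide
    constructor <;> (rw [pvLoopA]; simp [hn, pvSplit, pvPairs, pvSkip, hfind])
  | succ k IH =>
    intro i h0 hk
    by_cases hn : i < (s.length : Int)
    · have hm : i.toNat < s.length := by omega
      have hget : (PySem.List.pyGet? s i).getD ' ' = s[i.toNat] := by
        conv_lhs => rw [show i = ((i.toNat : Nat) : Int) from by omega]
        rw [PySem.List.pyGet?_natCast, List.getElem?_eq_getElem hm]
        rfl
      have hdrop : s.drop i.toNat = s[i.toNat] :: s.drop (i.toNat + 1) :=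
        List.drop_eq_getElem_cons hm
      have ht1 : (i + 1).toNat = i.toNat + 1 := by omega
      have IH1 := IH (i + 1) (by omega) (by omega)
      rw [ht1] at IH1
      constructor
      · -- instr = false
        rw [pvLoopA]
        simp only [hn, dif_pos, hget, hdrop]
        by_cases hq : s[i.toNat] = '\''
        · -- opening quote: delegate to the skip side
          rw [if_pos hq, hq, pvSplit, IH1.2, ← pvPairs_nil_head]
          simp
        · by_cases hs : s[i.toNat] = ';'
          · rw [if_neg hq, if_pos hs, hs, pvSplit]
            cases hsp : pvSplit (s.drop (i.toNat + 1)) with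
            | nil => exact absurd hsp (pvSplit_ne_nil _)
            | cons r rs =>
              have hfc : PySem.Chars.find (';' :: r) [';'] = 0 := by
                rw [find_semi_cons]; simp
              rw [pvPairs.eq_def]
              simp [hfc]
          · rw [if_neg hq, if_neg hs, IH1.1, pvSplit, if_neg hq]
            cases hsp : pvSplit (s.drop (i.toNat + 1)) with
            | nil => exact absurd hsp (pvSplit_ne_nil _)
            | cons r rs =>
              by_cases hfr : PySem.Chars.find r [';'] = -1
              · have hfc : PySem.Chars.find (s[i.toNat] :: r) [';'] = -1 := by
                  rw [find_semi_cons]; simp [hs, hfr]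
                cases rs with
                | nil =>
                  rw [pvPairs.eq_def]
                  rw [pvPairs.eq_def]
                  simp [hq, hfc, hfr]
                | cons lit rest2 =>
                  simp only [hq, Bool.false_eq_true, if_false]
                  rw [pvPairs.eq_def]
                  rw [pvPairs.eq_def]
                  simp only [hfc, hfr]
                  norm_num
                  congr 1
                  ring
              · have hg0 : 0 ≤ PySem.Chars.find r [';'] := by
                  rcases (PySem.Chars.neg_one_le_find r [';']).lt_or_eq with h | h
                  · omega
                  · exact absurd h.symm hfr
                have hfc : PySem.Chars.find (s[i.toNat] :: r) [';'] =
                    PySem.Chars.find r [';'] + 1 := by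
                  rw [find_semi_cons]; simp [hs, hfr]
                simp only [hq, Bool.false_eq_true, if_false]
                rw [pvPairs.eq_def]
                rw [pvPairs.eq_def]
                simp only [hfc]
                rw [if_pos (by omega : PySem.Chars.find r [';'] ≠ -1),
                  if_pos (by omega : PySem.Chars.find r [';'] + 1 ≠ -1)]
                omega
      · -- instr = true
        rw [pvLoopA]
        simp only [hn, dif_pos, hget]
        by_cases hq : s[i.toNat] = '\''
        · rw [if_pos hq]
          by_cases hnext : i + 1 < (s.length : Int) ∧
              (PySem.List.pyGet? s (i + 1)).getD ' ' = '\''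
          · -- '' escape: stay inside
            rw [if_pos hnext]
            have hm2 : i.toNat + 1 < s.length := by omega
            have hget2 : (PySem.List.pyGet? s (i + 1)).getD ' ' = s[i.toNat + 1] := by
              conv_lhs => rw [show i + 1 = ((i.toNat + 1 : Nat) : Int) from by omega]
              rw [PySem.List.pyGet?_natCast, List.getElem?_eq_getElem hm2]
              rfl
            have hq2 : s[i.toNat + 1] = '\'' := by rw [← hget2]; exact hnext.2
            have hdrop2 : s.drop (i.toNat + 1) = s[i.toNat + 1] :: s.drop (i.toNat + 2) :=
              List.drop_eq_getElem_cons hm2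
            have IH2 := IH (i + 2) (by omega) (by omega)
            have ht2 : (i + 2).toNat = i.toNat + 2 := by omega
            rw [ht2] at IH2
            rw [hdrop, hq, pvSplit]
            rw [hdrop2, hq2, pvSplit]
            rw [IH2.2]
            simp only [if_true]
            rw [pvSkip_esc]
          · -- close the literal
            rw [if_neg hnext, IH1.1, hdrop, hq, pvSplit]
            cases hsp : pvSplit (s.drop (i.toNat + 1)) with
            | nil => exact absurd hsp (pvSplit_ne_nil _)
            | cons r rs =>
              simp [pvSkip]
        · rw [if_neg hq, IH1.2, hdrop]
          cases hsp : pvSplit (s.drop (i.toNat + 1)) with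
          | nil => exact absurd hsp (pvSplit_ne_nil _)
          | cons r rs =>
            simp only [pvSplit, hsp, hq, if_false]
            cases rs with
            | nil => simp [pvSkip]
            | cons t ts =>
              simp only [pvSkip,
                if_neg (by simp : ¬ (t :: ts : List (List Char)) = [])]
              push_cast [List.length_cons]
              ring
    · have hd : s.drop i.toNat = [] := List.drop_of_length_le (by omega)
      rw [hd]
      have hfind : PySem.Chars.find [] [';'] = -1 := by decide
      constructor <;> (rw [pvLoopA]; simp [hn, pvSplit, pvPairs, pvSkip, hfind])

-- ===== VERDICT (by name: the statement is the Claim_ definition above) =====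
theorem find_statement_end_spec : Claim_equal_find_statement_end := by
  intro src start_idx _ hpre
  unfold Spec_find_statement_end find_statement_end find_statement_end_alt
  have h0 : (0 : Int) ≤ start_idx := hpre
  rw [splitOn_quote, PySem.List.slice_from _ h0]
  exact (pvLoop_split src.toList (src.toList.length - start_idx.toNat) start_idx h0
    (by omega)).1
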